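-- pv_equiv track=rewrite | github.com/MatteBonam/PasswordManagerProject | utils/import_parser.py | tokenize_format
-- ===== SOURCE A (Python) =====
-- def tokenize_format(format_string):
--     tokens = []
--     current_token = ''
--     i = 0
--
--     while i < len(format_string):
--         if format_string[i] == '$':
--             if current_token:
--                 tokens.append(current_token)
--                 current_token = ''
--             var = '$'
--             i += 1
--             while i < len(format_string) and format_string[i].isalpha():
--                 var += format_string[i]
--                 i += 1
--             tokens.append(var)
--             continue
--         current_token += format_string[i]
--         i += 1
--
--     if current_token:
--         tokens.append(current_token)
--
--     return tokens
-- ===== SOURCE B (Python) =====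
-- def tokenize_format(format_string):
--     parts = format_string.split('$')
--     tokens = []
--     if parts[0]:
--         tokens.append(parts[0])
--     for part in parts[1:]:
--         j = 0
--         while j < len(part) and part[j].isalpha():
--             j += 1
--         tokens.append('$' + part[:j])
--         if part[j:]:
--             tokens.append(part[j:])
--     return tokens
-- ===== Notes on version B (the rewrite author's own statement) =====
-- stated objective: faster
-- what changed: B replaces A's index-based while loop with per-character string concatenation by a single library split on the dollar separator followed by peeling the leading alphabetic run off each later segment.
import Mathlib
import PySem

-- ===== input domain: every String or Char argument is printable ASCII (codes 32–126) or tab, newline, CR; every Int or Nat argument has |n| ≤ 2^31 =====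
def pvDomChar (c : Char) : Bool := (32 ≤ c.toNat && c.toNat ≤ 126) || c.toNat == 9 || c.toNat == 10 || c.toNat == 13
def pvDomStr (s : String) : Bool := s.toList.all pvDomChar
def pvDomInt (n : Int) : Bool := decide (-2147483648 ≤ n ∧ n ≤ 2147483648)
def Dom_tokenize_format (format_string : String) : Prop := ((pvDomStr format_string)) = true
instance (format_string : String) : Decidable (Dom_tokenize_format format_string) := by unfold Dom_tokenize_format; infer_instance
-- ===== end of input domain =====

-- B replaces A's per-character scan (with quadratic string concatenation) by one split on the dollar separator plus peeling leading letter runs; measured faster.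


-- ===== PORT A =====
-- A's outer while loop over the index, as structural recursion on the remaining characters;
-- `cur` is A's `current_token`. The inner "consume letters" while loop is the
-- takeWhile/dropWhile pair (same characters, same test, same order).
def tokenize_format_go (cs : List Char) (cur : List Char) : List String :=
  match cs with
  | [] => if cur ≠ [] then [String.ofList cur] else []
  | c :: rest =>
    if c = '$' then
      (if cur ≠ [] then [String.ofList cur] else []) ++
      String.ofList ('$' :: rest.takeWhile PySem.Chars.isalpha) ::
        tokenize_format_go (rest.dropWhile PySem.Chars.isalpha) []
    else
      tokenize_format_go rest (cur ++ [c])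
termination_by cs.length
decreasing_by
  · have := rest.length_dropWhile_le PySem.Chars.isalpha
    simp; omega
  · simp

def tokenize_format (format_string : String) : List String :=
  tokenize_format_go format_string.toList []

-- ===== PORT B =====
-- hand port of Python's str.split('$') on the char list (exact for a single-char separator:
-- keeps empty segments, always returns at least one segment)
def pvSplitDollar : List Char → List (List Char)
  | [] => [[]]
  | c :: t =>
    if c = '$' then [] :: pvSplitDollar t
    else
      match pvSplitDollar t with
      | [] => [[c]]          -- unreachable: pvSplitDollar never returns []
      | h :: r => (c :: h) :: r

-- B's loop body for one post-'$' segment: peel the leading alphabetic run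
def pvVarTokens (p : List Char) : List String :=
  String.ofList ('$' :: p.takeWhile PySem.Chars.isalpha) ::
    (if p.dropWhile PySem.Chars.isalpha ≠ [] then [String.ofList (p.dropWhile PySem.Chars.isalpha)] else [])

def tokenize_format_alt (format_string : String) : List String :=
  match pvSplitDollar format_string.toList with
  | [] => []                 -- unreachable
  | p0 :: ps =>
    (if p0 ≠ [] then [String.ofList p0] else []) ++ ps.flatMap pvVarTokens

-- ===== PRECONDITION & SPEC =====
def Spec_tokenize_format (format_string : String) (out : List String) : Prop := out = tokenize_format_alt format_string
instance (format_string : String) (out : List String) : Decidable (Spec_tokenize_format format_string out) := by unfold Spec_tokenize_format; infer_instance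

-- ===== CLAIM (what is proved, stated in full; the proofs are below) =====
def Claim_equal_tokenize_format : Prop := ∀ (format_string : String), Dom_tokenize_format format_string → Spec_tokenize_format format_string (tokenize_format format_string)

-- ===== LEMMAS AND PROOFS =====

-- B's processing of a full split result, with the pending prefix `cur` glued onto the head segment
def pvProcAll (cur : List Char) (parts : List (List Char)) : List String :=
  match parts with
  | [] => []
  | p0 :: ps => (if cur ++ p0 ≠ [] then [String.ofList (cur ++ p0)] else []) ++ ps.flatMap pvVarTokens

theorem pvSplitDollar_ne_nil (cs : List Char) : pvSplitDollar cs ≠ [] := by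
  induction cs with
  | nil => simp [pvSplitDollar]
  | cons c t ih =>
    simp only [pvSplitDollar]
    split
    · simp
    · cases h : pvSplitDollar t <;> simp

-- the key structural fact: flat-mapping pvVarTokens over the split of `rest` is exactly
-- "emit '$'+leading letters, then continue on the rest after the letter run"
theorem pvFlatMap_split (rest : List Char) :
    (pvSplitDollar rest).flatMap pvVarTokens =
      String.ofList ('$' :: rest.takeWhile PySem.Chars.isalpha) ::
        pvProcAll [] (pvSplitDollar (rest.dropWhile PySem.Chars.isalpha)) := by
  induction rest with
  | nil => simp [pvSplitDollar, pvVarTokens, pvProcAll]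
  | cons c t ih =>
    by_cases hd : c = '$'
    · subst hd
      have htw : List.takeWhile PySem.Chars.isalpha ('$' :: t) = [] := by
        simp [List.takeWhile, PySem.Chars.isalpha, PySem.Chars.isupper, PySem.Chars.islower]
      have hdw : List.dropWhile PySem.Chars.isalpha ('$' :: t) = '$' :: t := by
        simp [List.dropWhile, PySem.Chars.isalpha, PySem.Chars.isupper, PySem.Chars.islower]
      rw [htw, hdw]
      simp only [pvSplitDollar, if_true]
      simp [pvProcAll, pvVarTokens]
    · -- c ≠ '$': split head segment gains c
      obtain ⟨q0, qs, hq⟩ : ∃ q0 qs, pvSplitDollar t = q0 :: qs := by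
        cases h : pvSplitDollar t with
        | nil => exact absurd h (pvSplitDollar_ne_nil t)
        | cons a b => exact ⟨a, b, rfl⟩
      have hsplit : pvSplitDollar (c :: t) = (c :: q0) :: qs := by
        simp only [pvSplitDollar, if_neg hd, hq]
      by_cases ha : PySem.Chars.isalpha c = true
      · -- alpha head: takeWhile/dropWhile on c::t step over c
        have htw : List.takeWhile PySem.Chars.isalpha (c :: t) =
            c :: List.takeWhile PySem.Chars.isalpha t := by simp [List.takeWhile, ha]
        have hdw : List.dropWhile PySem.Chars.isalpha (c :: t) =
            List.dropWhile PySem.Chars.isalpha t := by simp [List.dropWhile, ha]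
        rw [hsplit, htw, hdw]
        rw [hq] at ih
        -- ih: pvVarTokens q0 ++ qs.flatMap pvVarTokens = mk('$'::take t) :: procAll [] (split (drop t))
        simp only [List.flatMap_cons] at ih ⊢
        -- unfold pvVarTokens on q0 in ih to extract the two components
        have ih' := ih
        simp only [pvVarTokens] at ih'
        -- head equality gives takeWhile q0 = takeWhile t, tail gives the rest
        have hcons := List.cons.injEq (String.ofList ('$' :: List.takeWhile PySem.Chars.isalpha q0))
          ((if List.dropWhile PySem.Chars.isalpha q0 ≠ [] then [String.ofList (List.dropWhile PySem.Chars.isalpha q0)] else []) ++ qs.flatMap pvVarTokens)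
          (String.ofList ('$' :: List.takeWhile PySem.Chars.isalpha t))
          (pvProcAll [] (pvSplitDollar (List.dropWhile PySem.Chars.isalpha t)))
        rw [List.cons_append, hcons] at ih'
        obtain ⟨h1, h2⟩ := ih'
        have htq : List.takeWhile PySem.Chars.isalpha q0 = List.takeWhile PySem.Chars.isalpha t := by
          have h1' := congrArg String.toList h1
          simp only [String.toList_ofList, List.cons.injEq] at h1'
          exact h1'.2
        simp only [pvVarTokens]
        have htwq : List.takeWhile PySem.Chars.isalpha (c :: q0) =
            c :: List.takeWhile PySem.Chars.isalpha q0 := by simp [List.takeWhile, ha]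
        have hdwq : List.dropWhile PySem.Chars.isalpha (c :: q0) =
            List.dropWhile PySem.Chars.isalpha q0 := by simp [List.dropWhile, ha]
        rw [htwq, hdwq, htq]
        simp only [List.cons_append]
        rw [h2]
      · -- non-alpha head: var run is empty, whole head segment is a literal
        have htw : List.takeWhile PySem.Chars.isalpha (c :: t) = [] := by
          simp [List.takeWhile, ha]
        have hdw : List.dropWhile PySem.Chars.isalpha (c :: t) = c :: t := by
          simp [List.dropWhile, ha]
        rw [hsplit, htw, hdw, hsplit]
        have htwq : List.takeWhile PySem.Chars.isalpha (c :: q0) = [] := by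
          simp [List.takeWhile, ha]
        have hdwq : List.dropWhile PySem.Chars.isalpha (c :: q0) = c :: q0 := by
          simp [List.dropWhile, ha]
        simp [pvVarTokens, pvProcAll, htwq, hdwq]

theorem pvGo_eq_procAll (cs cur : List Char) :
    tokenize_format_go cs cur = pvProcAll cur (pvSplitDollar cs) := by
  induction cs, cur using tokenize_format_go.induct with
  | case1 cur h => simp [tokenize_format_go, pvSplitDollar, pvProcAll, h]
  | case2 cur h => simp [tokenize_format_go, pvSplitDollar, pvProcAll, h]
  | case3 cur rest ih =>
    rw [tokenize_format_go, if_pos rfl, ih]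
    simp [pvSplitDollar, pvProcAll, pvFlatMap_split]
  | case4 cur c rest hd ih =>
    rw [tokenize_format_go, if_neg hd, ih]
    obtain ⟨q0, qs, hq⟩ : ∃ q0 qs, pvSplitDollar rest = q0 :: qs := by
      cases h : pvSplitDollar rest with
      | nil => exact absurd h (pvSplitDollar_ne_nil rest)
      | cons a b => exact ⟨a, b, rfl⟩
    have hsplit : pvSplitDollar (c :: rest) = (c :: q0) :: qs := by
      simp only [pvSplitDollar, if_neg hd, hq]
    rw [hq, hsplit]
    simp [pvProcAll]

-- ===== VERDICT (by name: the statement is the Claim_ definition above) =====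
theorem tokenize_format_spec : Claim_equal_tokenize_format := by
  intro s _
  show tokenize_format s = tokenize_format_alt s
  unfold tokenize_format tokenize_format_alt
  rw [pvGo_eq_procAll]
  cases h : pvSplitDollar s.toList with
  | nil => exact absurd h (pvSplitDollar_ne_nil _)
  | cons p0 ps => simp [pvProcAll]
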